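-- pv_equiv track=rewrite | github.com/adityamishra-lilly/package-bot | app/activities/build__alerts_object.py | _safe_max_version
-- ===== SOURCE A (Python) =====
-- from typing import Any, Dict, List, Tuple, Optional, DefaultDict
--
-- def _parse_version(version_str: str) -> Tuple[List[int], str]:
--     """Parse version string into comparable parts. Returns tuple of (numeric_parts, original_string)."""
--     v = version_str.lstrip('v')
--     parts = []
--     for part in v.split('.'):
--         numeric = ''
--         for char in part:
--             if char.isdigit():
--                 numeric += char
--             else:
--                 break
--         if numeric:
--             parts.append(int(numeric))
--         else:
--             parts.append(0)
--     return (parts, version_str)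
--
-- def _safe_max_version(versions: List[str]) -> Optional[str]:
--     """Return highest version using simple numeric comparison; ignore invalid entries."""
--     if not versions:
--         return None
--     parsed = []
--     for v in versions:
--         try:
--             parsed.append(_parse_version(v))
--         except Exception:
--             continue
--     if not parsed:
--         return None
--     parsed.sort(key=lambda t: t[0])
--     return parsed[-1][1]
-- ===== SOURCE B (Python) =====
-- from typing import Any, Dict, List, Tuple, Optional, DefaultDict
--
-- def _parse_version(version_str: str) -> Tuple[List[int], str]:
--     """Parse version string into comparable parts. Returns tuple of (numeric_parts, original_string)."""
--     v = version_str.lstrip('v')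
--     parts = []
--     for part in v.split('.'):
--         numeric = ''
--         for char in part:
--             if char.isdigit():
--                 numeric += char
--             else:
--                 break
--         if numeric:
--             parts.append(int(numeric))
--         else:
--             parts.append(0)
--     return (parts, version_str)
--
-- def _safe_max_version(versions: List[str]) -> Optional[str]:
--     """Return highest version by a single running-max scan (no sort); >= keeps the last of tied keys, matching the stable sort."""
--     best = None
--     for v in versions:
--         try:
--             p = _parse_version(v)
--         except Exception:
--             continue
--         if best is None or p[0] >= best[0]:
--             best = p
--     return best[1] if best is not None else None
-- ===== Notes on version B (the rewrite author's own statement) =====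
-- stated objective: alternative
-- what changed: Replaced collect-then-stable-sort-then-take-last with a single O(n) running-max scan that keeps one best (parts, string) pair, using >= to reproduce the stable sort's last-of-ties choice.
import Mathlib
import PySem

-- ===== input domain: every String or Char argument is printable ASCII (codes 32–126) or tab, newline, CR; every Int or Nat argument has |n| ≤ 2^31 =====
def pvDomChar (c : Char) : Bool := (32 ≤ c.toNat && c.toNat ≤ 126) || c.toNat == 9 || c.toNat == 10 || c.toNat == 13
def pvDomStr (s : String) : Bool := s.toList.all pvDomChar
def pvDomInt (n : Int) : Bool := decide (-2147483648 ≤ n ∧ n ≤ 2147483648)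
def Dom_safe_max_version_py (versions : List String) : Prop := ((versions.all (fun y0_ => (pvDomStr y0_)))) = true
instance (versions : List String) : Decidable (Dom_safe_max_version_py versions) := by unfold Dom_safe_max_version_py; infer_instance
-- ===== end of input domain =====

-- B replaces A's collect/stable-sort/take-last with a single running-max scan keeping one best pair (alternative decomposition, same results).


-- ===== PORT A =====
-- inner `for char in part: if char.isdigit(): numeric += char else: break`
def pvDigitsPrefix : List Char → List Char
  | [] => []
  | c :: cs => if PySem.Chars.isdigit c then c :: pvDigitsPrefix cs else []

-- _parse_version (shared helper, used verbatim by both A and B in Python)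
def parse_version_py (version_str : String) : List Int × String :=
  let v : List Char := version_str.toList.dropWhile (fun c => c == 'v')  -- s.lstrip('v'): drop leading 'v' chars (exact)
  let parts : List Int := (PySem.Chars.splitOn v ['.']).foldl
    (fun acc part =>
      let numeric := pvDigitsPrefix part
      if numeric ≠ [] then
        acc ++ [(PySem.Int.ofChars? numeric).getD 0]  -- int(numeric): numeric is a nonempty digit run, so ofChars? = some
      else
        acc ++ [0]) []
  (parts, version_str)

def safe_max_version_py (versions : List String) : Option String :=
  if versions = [] then none
  else
    let parsed := versions.foldl (fun acc v => acc ++ [parse_version_py v]) []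
    if parsed = [] then none
    else
      match PySem.List.pyGet? (PySem.List.sorted parsed (fun t => t.1)) (-1) with
      | some t => some t.2
      | none => none   -- unreachable: parsed ≠ []

-- ===== PORT B =====
-- `if best is None or p[0] >= best[0]: best = p`
def pvStep (b : Option (List Int × String)) (p : List Int × String) : Option (List Int × String) :=
  match b with
  | none => some p
  | some q => if q.1 ≤ p.1 then some p else some q

def safe_max_version_py_alt (versions : List String) : Option String :=
  (versions.foldl (fun b v => pvStep b (parse_version_py v)) none).map (fun q => q.2)

-- ===== PRECONDITION & SPEC =====
def Spec_safe_max_version_py (versions : List String) (out : Option String) : Prop := out = safe_max_version_py_alt versions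
instance (versions : List String) (out : Option String) : Decidable (Spec_safe_max_version_py versions out) := by unfold Spec_safe_max_version_py; infer_instance

-- ===== CLAIM (what is proved, stated in full; the proofs are below) =====
def Claim_equal_safe_max_version_py : Prop := ∀ (versions : List String), Dom_safe_max_version_py versions → Spec_safe_max_version_py versions (safe_max_version_py versions)

-- ===== LEMMAS AND PROOFS =====

theorem pv_insertBy_ne_nil (bf : (List Int × String) → (List Int × String) → Bool)
    (p : List Int × String) (ys : List (List Int × String)) :
    PySem.List.insertBy bf p ys ≠ [] := by
  cases ys with
  | nil => simp [PySem.List.insertBy]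
  | cons y t => simp only [PySem.List.insertBy]; split <;> simp

theorem pv_getLast?_insertBy (bf : (List Int × String) → (List Int × String) → Bool)
    (hbf : ∀ a b, bf a b = decide (a.1 < b.1)) (p : List Int × String)
    (ys : List (List Int × String)) (h : ys.Pairwise (fun a b => a.1 ≤ b.1)) :
    (PySem.List.insertBy bf p ys).getLast? = pvStep ys.getLast? p := by
  induction ys with
  | nil => simp [PySem.List.insertBy, pvStep]
  | cons y t ih =>
    simp only [PySem.List.insertBy, hbf]
    by_cases hlt : p.1 < y.1
    · simp only [hlt, decide_true, if_true]
      rw [List.getLast?_cons_cons]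
      cases hq0 : (y :: t).getLast? with
      | none => simp at hq0
      | some q =>
        have hqm : q ∈ y :: t := List.mem_of_getLast? hq0
        have hyq : y.1 ≤ q.1 := by
          rcases List.mem_cons.mp hqm with he | hmem
          · exact le_of_eq (by rw [he])
          · exact (List.pairwise_cons.mp h).1 _ hmem
        have hq : ¬ q.1 ≤ p.1 := fun hle =>
          absurd (lt_of_lt_of_le hlt (le_trans hyq hle)) (lt_irrefl _)
        simp [pvStep, hq]
    · simp only [hlt, decide_false, Bool.false_eq_true, if_false]
      have hy : y.1 ≤ p.1 := le_of_not_gt hlt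
      cases t with
      | nil => simp [PySem.List.insertBy, pvStep, hy]
      | cons u t' =>
        have hne := pv_insertBy_ne_nil bf p (u :: t')
        obtain ⟨c, l', hcl⟩ := List.exists_cons_of_ne_nil hne
        rw [hcl, List.getLast?_cons_cons, ← hcl, ih (List.pairwise_cons.mp h).2,
          List.getLast?_cons_cons]

theorem pv_sorted_pairwise' (ps : List (List Int × String)) :
    List.Pairwise (fun a b => a.1 ≤ b.1) (PySem.List.sorted ps (fun t => t.1)) := by
  have h := PySem.List.sorted_pairwise ps (fun t : List Int × String => t.1)
  have hd : (LinearOrder.toDecidableLT : DecidableLT (List Int)) = (fun a b => a.decidableLT b) := by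
    funext a b; exact Subsingleton.elim _ _
  rw [hd] at h
  exact h

theorem pv_sorted_last_eq_foldl (ps : List (List Int × String)) :
    (PySem.List.sorted ps (fun t => t.1)).getLast? = ps.foldl pvStep none := by
  induction ps using List.reverseRecOn with
  | nil => simp [PySem.List.sorted_eq_foldl_insertBy]
  | append_singleton ps p ih =>
    have hs : PySem.List.sorted (ps ++ [p]) (fun t => t.1)
        = PySem.List.insertBy (fun a b => decide (a.1 < b.1)) p (PySem.List.sorted ps (fun t => t.1)) := by
      rw [PySem.List.sorted_eq_foldl_insertBy, PySem.List.sorted_eq_foldl_insertBy, List.foldl_append]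
      simp
    rw [List.foldl_append, List.foldl_cons, List.foldl_nil, ← ih, hs]
    exact pv_getLast?_insertBy _ (fun a b => by by_cases hx : a.1 < b.1 <;> simp [hx]) p _
      (pv_sorted_pairwise' ps)

theorem pv_foldl_append_eq_map (versions : List String) :
    versions.foldl (fun acc v => acc ++ [parse_version_py v]) [] = versions.map parse_version_py := by
  have h : ∀ (vs : List String) (acc : List (List Int × String)),
      vs.foldl (fun acc v => acc ++ [parse_version_py v]) acc = acc ++ vs.map parse_version_py := by
    intro vs
    induction vs with
    | nil => simp
    | cons v t ih => intro acc; simp [List.foldl_cons, ih]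
  simpa using h versions []

-- ===== VERDICT (by name: the statement is the Claim_ definition above) =====
theorem safe_max_version_py_spec : Claim_equal_safe_max_version_py := by
  intro versions _
  unfold Spec_safe_max_version_py safe_max_version_py safe_max_version_py_alt
  cases versions with
  | nil => simp
  | cons v vs =>
    simp only [if_neg (by simp : (v :: vs) ≠ [])]
    rw [pv_foldl_append_eq_map]
    have hne : (v :: vs).map parse_version_py ≠ [] := by simp
    rw [if_neg hne, PySem.List.pyGet?_neg_one, pv_sorted_last_eq_foldl, List.foldl_map]
    cases h : (v :: vs).foldl (fun b w => pvStep b (parse_version_py w)) none with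
    | none => simp
    | some q => simp
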